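-- pv_equiv track=rewrite | github.com/cereal-lab/GA_DataMining-Parson | Misc/Scripts/SeqCleaning.py | processedString_2
-- ===== SOURCE A (Python) =====
-- def processedString_2(str2, removedChar, keep):
--
--     count = 1
--     seq = ""
--     for j in str2:
--         if j == removedChar and count <= keep:
--             count += 1
--             seq += j
--             continue
--
--         if j == removedChar and count > keep:
--             count += 1
--             continue
--
--         seq += j
--
--     return seq
-- ===== SOURCE B (Python) =====
-- def processedString_2(str2, removedChar, keep):
--     # Split on the separator and re-join only the first keep separators.
--     if len(removedChar) != 1:
--         return str2  # a single character can never equal a non-1-char string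
--     parts = str2.split(removedChar)
--     k = max(keep, 0)
--     return removedChar.join(parts[:k + 1]) + ''.join(parts[k + 1:])
-- ===== Notes on version B (the rewrite author's own statement) =====
-- stated objective: idiomatic
-- what changed: Replaces the char-by-char counting loop with a split on the separator followed by re-joining only the first keep separators (removedChar.join on the first keep+1 segments, plain concatenation of the rest).
import Mathlib
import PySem

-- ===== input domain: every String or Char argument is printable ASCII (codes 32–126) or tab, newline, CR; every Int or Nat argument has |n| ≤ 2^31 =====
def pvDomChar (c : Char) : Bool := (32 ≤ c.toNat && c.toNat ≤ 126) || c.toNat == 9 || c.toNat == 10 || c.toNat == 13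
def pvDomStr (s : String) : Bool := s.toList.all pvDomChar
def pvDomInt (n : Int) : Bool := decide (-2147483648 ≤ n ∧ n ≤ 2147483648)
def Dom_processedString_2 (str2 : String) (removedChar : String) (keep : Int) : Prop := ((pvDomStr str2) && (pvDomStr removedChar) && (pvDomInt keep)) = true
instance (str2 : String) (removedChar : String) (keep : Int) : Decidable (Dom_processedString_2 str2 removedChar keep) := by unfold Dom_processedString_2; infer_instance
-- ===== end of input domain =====

-- B rebuilds the string by splitting on the separator and re-joining only the first keep
-- separators, instead of A's char-by-char counting loop (objective: idiomatic).

-- ===== PORT A =====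
def processedString_2 (str2 : String) (removedChar : String) (keep : Int) : String :=
  -- count = 1; seq = ""; for j in str2: three branches exactly as in the Python source
  String.ofList
    (str2.toList.foldl (fun (st : Int × List Char) j =>
        if [j] = removedChar.toList ∧ st.1 ≤ keep then (st.1 + 1, st.2 ++ [j])
        else if [j] = removedChar.toList ∧ st.1 > keep then (st.1 + 1, st.2)
        else (st.1, st.2 ++ [j]))
      (1, ([] : List Char))).2

-- ===== PORT B =====
def processedString_2_alt (str2 : String) (removedChar : String) (keep : Int) : String :=
  if PySem.Str.len removedChar ≠ 1 then str2
  else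
    -- parts = str2.split(removedChar); k = max(keep, 0);
    -- removedChar.join(parts[:k+1]) + ''.join(parts[k+1:])
    String.ofList
      (PySem.Chars.join removedChar.toList
        (PySem.List.slice (PySem.Chars.splitOn str2.toList removedChar.toList)
          none (some (max keep 0 + 1))) ++
       PySem.Chars.join []
        (PySem.List.slice (PySem.Chars.splitOn str2.toList removedChar.toList)
          (some (max keep 0 + 1)) none))

-- ===== PRECONDITION & SPEC =====
def Spec_processedString_2 (str2 : String) (removedChar : String) (keep : Int) (out : String) : Prop := out = processedString_2_alt str2 removedChar keep
instance (str2 : String) (removedChar : String) (keep : Int) (out : String) : Decidable (Spec_processedString_2 str2 removedChar keep out) := by unfold Spec_processedString_2; infer_instance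

-- ===== CLAIM (what is proved, stated in full; the proofs are below) =====
def Claim_equal_processedString_2 : Prop := ∀ (str2 : String) (removedChar : String) (keep : Int), Dom_processedString_2 str2 removedChar keep → Spec_processedString_2 str2 removedChar keep (processedString_2 str2 removedChar keep)

-- ===== LEMMAS AND PROOFS =====

-- keep the first n occurrences of c, drop the rest (common characterisation of both programs)
def pvCore (c : Char) : List Char → Nat → List Char
  | [], _ => []
  | j :: rest, n =>
    if j = c then
      match n with
      | 0 => pvCore c rest 0
      | m + 1 => j :: pvCore c rest m
    else j :: pvCore c rest n

-- structural form of splitting on a single character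
def pvSplit1 (c : Char) : List Char → List (List Char)
  | [] => [[]]
  | j :: rest => if j = c then [] :: pvSplit1 c rest
                 else (pvSplit1 c rest).modifyHead (j :: ·)

theorem pvCore_cons_self (c : Char) (rest : List Char) :
    pvCore c (c :: rest) 0 = pvCore c rest 0 := by simp [pvCore]

theorem pvCore_cons_self_succ (c : Char) (rest : List Char) (m : Nat) :
    pvCore c (c :: rest) (m + 1) = c :: pvCore c rest m := by simp [pvCore]

theorem pvCore_cons_ne {j c : Char} (hj : j ≠ c) (rest : List Char) (n : Nat) :
    pvCore c (j :: rest) n = j :: pvCore c rest n := by simp [pvCore, hj]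

theorem pvSplit1_cons_self (c : Char) (rest : List Char) :
    pvSplit1 c (c :: rest) = [] :: pvSplit1 c rest := by simp [pvSplit1]

theorem pvSplit1_cons_ne {j c : Char} (hj : j ≠ c) (rest : List Char) :
    pvSplit1 c (j :: rest) = (pvSplit1 c rest).modifyHead (j :: ·) := by simp [pvSplit1, hj]

theorem pvSplit1_ne_nil (c : Char) (cs : List Char) : pvSplit1 c cs ≠ [] := by
  induction cs with
  | nil => simp [pvSplit1]
  | cons j rest ih =>
    by_cases hj : j = c
    · rw [hj, pvSplit1_cons_self]; simp
    · rw [pvSplit1_cons_ne hj]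
      cases h : pvSplit1 c rest with
      | nil => exact absurd h ih
      | cons p ps => simp [List.modifyHead]

theorem pvGo_eq (c : Char) (cs : List Char) : ∀ (fuel : Nat) (cur : List Char)
    (acc : List (List Char)), cs.length ≤ fuel →
    PySem.Chars.splitOn.go [c] fuel cs cur acc
      = acc.reverse ++ (pvSplit1 c cs).modifyHead (cur.reverse ++ ·) := by
  induction cs with
  | nil =>
    intro fuel cur acc _
    cases fuel with
    | zero => rw [PySem.Chars.splitOn.go] ; simp [pvSplit1, List.modifyHead]
    | succ f => rw [PySem.Chars.splitOn.go] <;> simp [pvSplit1, List.modifyHead]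
  | cons j rest ih =>
    intro fuel cur acc hf
    cases fuel with
    | zero => simp at hf
    | succ f =>
      have hf' : rest.length ≤ f := by simp at hf; omega
      rw [PySem.Chars.splitOn.go]
      by_cases hj : j = c
      · have hpre : [c].isPrefixOf (j :: rest) = true := by simp [List.isPrefixOf, hj]
        rw [if_pos hpre]
        have hdrop : List.drop [c].length (j :: rest) = rest := by simp
        rw [hdrop, ih f [] (cur.reverse :: acc) hf', hj, pvSplit1_cons_self]
        cases h : pvSplit1 c rest with
        | nil => exact absurd h (pvSplit1_ne_nil c rest)
        | cons p ps => simp [List.modifyHead]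
      · have hpre : ¬([c].isPrefixOf (j :: rest) = true) := by
          simp [List.isPrefixOf]; intro h; exact absurd h.symm hj
        rw [if_neg hpre, ih f (j :: cur) acc hf', pvSplit1_cons_ne hj]
        cases h : pvSplit1 c rest with
        | nil => exact absurd h (pvSplit1_ne_nil c rest)
        | cons p ps => simp [List.modifyHead]

theorem pvSplitOn_eq (c : Char) (cs : List Char) :
    PySem.Chars.splitOn cs [c] = pvSplit1 c cs := by
  show PySem.Chars.splitOn.go [c] (cs.length + 1) cs [] [] = _
  rw [pvGo_eq c cs (cs.length + 1) [] [] (by omega)]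
  cases h : pvSplit1 c cs with
  | nil => exact absurd h (pvSplit1_ne_nil c cs)
  | cons p ps => simp [List.modifyHead]

theorem pvJoin_nil_sep (parts : List (List Char)) :
    PySem.Chars.join [] parts = parts.flatten := by
  induction parts with
  | nil => simp [PySem.Chars.join_nil]
  | cons p ps ih =>
    cases ps with
    | nil => simp [PySem.Chars.join_singleton]
    | cons q qs => rw [PySem.Chars.join_cons_cons]; simp [ih]

theorem pvJoin_cons_head (sep : List Char) (a : Char) (p : List Char)
    (t : List (List Char)) :
    PySem.Chars.join sep ((a :: p) :: t) = a :: PySem.Chars.join sep (p :: t) := by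
  cases t with
  | nil => simp [PySem.Chars.join_singleton]
  | cons q qs => rw [PySem.Chars.join_cons_cons, PySem.Chars.join_cons_cons]; simp

theorem pvFlatten_split1 (c : Char) (cs : List Char) :
    (pvSplit1 c cs).flatten = pvCore c cs 0 := by
  induction cs with
  | nil => simp [pvSplit1, pvCore]
  | cons j rest ih =>
    by_cases hj : j = c
    · rw [hj, pvSplit1_cons_self, pvCore_cons_self]; simpa using ih
    · rw [pvSplit1_cons_ne hj, pvCore_cons_ne hj]
      cases h : pvSplit1 c rest with
      | nil => exact absurd h (pvSplit1_ne_nil c rest)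
      | cons p ps =>
        rw [h] at ih
        simp [List.modifyHead, ← ih]

theorem pvB_core (c : Char) (cs : List Char) : ∀ (n : Nat),
    PySem.Chars.join [c] ((pvSplit1 c cs).take (n + 1))
      ++ ((pvSplit1 c cs).drop (n + 1)).flatten = pvCore c cs n := by
  induction cs with
  | nil => intro n; simp [pvSplit1, pvCore, PySem.Chars.join_singleton]
  | cons j rest ih =>
    intro n
    by_cases hj : j = c
    · rw [hj, pvSplit1_cons_self]
      cases n with
      | zero =>
        rw [pvCore_cons_self]
        simp [PySem.Chars.join_singleton, pvFlatten_split1]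
      | succ m =>
        rw [pvCore_cons_self_succ]
        simp only [List.take_succ_cons, List.drop_succ_cons]
        cases h : pvSplit1 c rest with
        | nil => exact absurd h (pvSplit1_ne_nil c rest)
        | cons p ps =>
          rw [h] at ih
          simp only [List.take_succ_cons]
          rw [PySem.Chars.join_cons_cons]
          have := ih m
          simp only [List.take_succ_cons] at this
          simpa using this
    · rw [pvSplit1_cons_ne hj, pvCore_cons_ne hj]
      cases h : pvSplit1 c rest with
      | nil => exact absurd h (pvSplit1_ne_nil c rest)
      | cons p ps =>
        rw [h] at ih
        simp only [List.modifyHead, List.take_succ_cons, List.drop_succ_cons]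
        rw [pvJoin_cons_head]
        have := ih n
        simp only [List.take_succ_cons, List.drop_succ_cons] at this
        simp [this]

-- A's loop, when removedChar is the single character c, computes pvCore with budget keep - count + 1
theorem pvA_loop (c : Char) (removedChar : String) (keep : Int)
    (hc : removedChar.toList = [c]) (cs : List Char) : ∀ (count : Int) (seq : List Char),
    (cs.foldl (fun (st : Int × List Char) j =>
        if [j] = removedChar.toList ∧ st.1 ≤ keep then (st.1 + 1, st.2 ++ [j])
        else if [j] = removedChar.toList ∧ st.1 > keep then (st.1 + 1, st.2)
        else (st.1, st.2 ++ [j])) (count, seq)).2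
      = seq ++ pvCore c cs (keep - count + 1).toNat := by
  induction cs with
  | nil => intro count seq; simp [pvCore]
  | cons j rest ih =>
    intro count seq
    rw [List.foldl_cons]
    by_cases hj : j = c
    · have hjc : [j] = removedChar.toList := by rw [hc, hj]
      by_cases hcnt : count ≤ keep
      · rw [if_pos ⟨hjc, hcnt⟩]
        have h1 : (keep - count + 1).toNat = (keep - (count + 1) + 1).toNat + 1 := by omega
        rw [ih (count + 1) (seq ++ [j]), hj, h1, pvCore_cons_self_succ]
        simp
      · rw [if_neg (fun h => hcnt h.2), if_pos ⟨hjc, by omega⟩]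
        have h1 : (keep - count + 1).toNat = 0 := by omega
        have h2 : (keep - (count + 1) + 1).toNat = 0 := by omega
        rw [ih (count + 1) seq, hj, h1, h2, pvCore_cons_self]
    · have hne : ¬([j] = removedChar.toList) := by rw [hc]; simp [hj]
      rw [if_neg (fun h => hne h.1), if_neg (fun h => hne h.1)]
      rw [ih count (seq ++ [j]), pvCore_cons_ne hj]
      simp

-- A's loop never matches when removedChar is not a single character
theorem pvA_loop_id (removedChar : String) (keep : Int)
    (hc : removedChar.toList.length ≠ 1) (cs : List Char) : ∀ (count : Int) (seq : List Char),
    (cs.foldl (fun (st : Int × List Char) j =>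
        if [j] = removedChar.toList ∧ st.1 ≤ keep then (st.1 + 1, st.2 ++ [j])
        else if [j] = removedChar.toList ∧ st.1 > keep then (st.1 + 1, st.2)
        else (st.1, st.2 ++ [j])) (count, seq)).2 = seq ++ cs := by
  induction cs with
  | nil => intro count seq; simp
  | cons j rest ih =>
    intro count seq
    have hne : ¬([j] = removedChar.toList) := by
      intro h; exact hc (by rw [← h]; rfl)
    rw [List.foldl_cons, if_neg (fun h => hne h.1), if_neg (fun h => hne h.1)]
    rw [ih count (seq ++ [j])]
    simp

-- ===== VERDICT (by name: the statement is the Claim_ definition above) =====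
theorem processedString_2_spec : Claim_equal_processedString_2 := by
  intro str2 removedChar keep _
  unfold Spec_processedString_2 processedString_2 processedString_2_alt
  by_cases hlen : PySem.Str.len removedChar = 1
  · rw [if_neg (by simpa using hlen)]
    have hl : removedChar.toList.length = 1 := by
      have h := PySem.Str.len_eq removedChar
      rw [h] at hlen; exact_mod_cast hlen
    obtain ⟨c, hc⟩ : ∃ c, removedChar.toList = [c] := by
      cases h : removedChar.toList with
      | nil => rw [h] at hl; simp at hl
      | cons a t =>
        rw [h] at hl; simp at hl
        exact ⟨a, by rw [hl]⟩
    rw [pvA_loop c removedChar keep hc str2.toList 1 []]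
    have hk1 : (0 : Int) ≤ max keep 0 + 1 := by omega
    rw [hc, pvSplitOn_eq c str2.toList,
        PySem.List.slice_to _ hk1, PySem.List.slice_from _ hk1,
        pvJoin_nil_sep]
    have hkn : (max keep 0 + 1).toNat = (keep - 1 + 1).toNat + 1 := by omega
    rw [hkn, pvB_core c str2.toList ((keep - 1 + 1).toNat)]
    simp
  · rw [if_pos (by simpa using hlen)]
    have hl : removedChar.toList.length ≠ 1 := by
      intro h
      exact hlen (by rw [PySem.Str.len_eq, h]; rfl)
    rw [pvA_loop_id removedChar keep hl str2.toList 1 []]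
    simp [String.ofList_toList]
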